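-- pv_equiv track=rewrite | github.com/tatukempas/Ohjelmoinnin-perusteet | WEEK 7/A7_T7.py | encode_line
-- ===== SOURCE A (Python) =====
-- ALPHABET = "ABCDEFGHIJKLMNOPQRSTUVWXYZ"
--
-- def rotate(rotor_pos):
--     rotor_pos[0] = (rotor_pos[0] + 1) % 26
--     if rotor_pos[0] == 0:
--         rotor_pos[1] = (rotor_pos[1] + 1) % 26
--         if rotor_pos[1] == 0:
--             rotor_pos[2] = (rotor_pos[2] + 1) % 26
--     return rotor_pos
--
-- def encode_char(c, rotors, pos, reflector):
--     idx = ALPHABET.index(c)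
--     for i in range(3):
--         rotor = rotors[i]
--         p = pos[i]
--         idx = (rotor.index(ALPHABET[(idx+p)%26]) - p + 26) % 26
--     idx = ALPHABET.index(reflector[idx])
--     for i in reversed(range(3)):
--         rotor = rotors[i]
--         p = pos[i]
--         idx = (rotor[(idx+p)%26])
--         idx = (ALPHABET.index(idx) - p + 26) % 26
--     return ALPHABET[idx]
--
-- def encode_line(line, rotor_pos, rotors, reflector):
--     encoded = ""
--     pos = rotor_pos.copy()
--     for char in line.upper():
--         if char not in ALPHABET:
--             encoded += char
--             continue
--         pos = rotate(pos)
--         encoded += encode_char(char, rotors, pos, reflector)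
--     return encoded
-- ===== SOURCE B (Python) =====
-- ALPHABET = "ABCDEFGHIJKLMNOPQRSTUVWXYZ"
--
-- def encode_line(line, rotor_pos, rotors, reflector):
--     # Precompute per-rotor lookup tables once, and replace the list-odometer
--     # by a single integer counter whose base-26 digits are the rotor positions.
--     up = line.upper()
--     if all(ch not in ALPHABET for ch in up):
--         return up
--     fwd = [[rotors[i].index(ALPHABET[a]) for a in range(26)] for i in range(3)]
--     back = [[ALPHABET.index(rotors[i][a]) for a in range(26)] for i in range(3)]
--     refl = [ALPHABET.index(reflector[a]) for a in range(26)]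
--     base = rotor_pos[0] % 26 + 26 * (rotor_pos[1] % 26) + 676 * (rotor_pos[2] % 26)
--     out = []
--     k = 0
--     for ch in up:
--         if ch not in ALPHABET:
--             out.append(ch)
--             continue
--         k += 1
--         t = base + k
--         p = [t % 26, (t // 26) % 26, (t // 676) % 26]
--         idx = ALPHABET.index(ch)
--         for i in range(3):
--             idx = (fwd[i][(idx + p[i]) % 26] - p[i]) % 26
--         idx = refl[idx]
--         for i in (2, 1, 0):
--             idx = (back[i][(idx + p[i]) % 26] - p[i]) % 26
--         out.append(ALPHABET[idx])
--     return "".join(out)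
-- ===== Notes on version B (the rewrite author's own statement) =====
-- stated objective: alternative
-- what changed: B replaces the mutable three-cell odometer (cascading rotate with carries) by a single integer step counter whose base-26 digits give the rotor positions, precomputes the forward/backward rotor index tables and the reflector table once so the per-character linear .index scans disappear, and returns the upper-cased line directly when it contains no letter.
-- outside the precondition, e.g. on encode_line('a', [0, 0, 0], [['B'], ['Z'], ['A']], ['A']): A returns 'A', B raises ValueError
import Mathlib
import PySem

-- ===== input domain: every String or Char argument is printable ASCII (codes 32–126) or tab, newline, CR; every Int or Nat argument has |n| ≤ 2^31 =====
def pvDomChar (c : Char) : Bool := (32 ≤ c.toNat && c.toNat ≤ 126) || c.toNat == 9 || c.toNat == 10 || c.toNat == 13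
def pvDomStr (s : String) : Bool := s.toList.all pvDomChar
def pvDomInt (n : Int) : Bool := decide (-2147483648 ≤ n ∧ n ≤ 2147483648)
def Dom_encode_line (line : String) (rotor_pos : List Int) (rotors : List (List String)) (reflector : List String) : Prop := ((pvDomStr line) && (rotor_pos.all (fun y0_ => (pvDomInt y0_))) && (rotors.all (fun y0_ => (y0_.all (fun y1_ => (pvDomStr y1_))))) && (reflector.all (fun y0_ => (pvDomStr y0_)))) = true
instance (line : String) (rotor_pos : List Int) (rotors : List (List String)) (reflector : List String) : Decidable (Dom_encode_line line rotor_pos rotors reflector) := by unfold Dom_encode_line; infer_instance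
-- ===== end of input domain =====

-- B keeps the per-character Enigma transform but drives the rotors by a single
-- integer step counter (base-26 digits) instead of A's cascading list odometer,
-- and precomputes the rotor/reflector index tables once. (objective: alternative)

-- ===== PORT A =====
def pvAlph : List Char := "ABCDEFGHIJKLMNOPQRSTUVWXYZ".toList

-- ALPHABET.index(s) for a string s (Python str.index; -1 where Python raises, outside Pre_)
def pvAidx (cs : List Char) : Int := PySem.Chars.find pvAlph cs

def pvRotate (pos : List Int) : List Int :=
  let p0 := PySem.Int.mod (pos.getD 0 0 + 1) 26
  let pos1 := pos.set 0 p0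
  if p0 = 0 then
    let p1 := PySem.Int.mod (pos1.getD 1 0 + 1) 26
    let pos2 := pos1.set 1 p1
    if p1 = 0 then pos2.set 2 (PySem.Int.mod (pos2.getD 2 0 + 1) 26) else pos2
  else pos1

def pvEncodeChar (c : Char) (rotors : List (List String)) (pos : List Int) (reflector : List String) : Char :=
  let idx0 : Int := pvAidx [c]
  let idx1 := (List.range 3).foldl (fun idx i =>
      let rotor := rotors.getD i []
      let p := pos.getD i 0
      PySem.Int.mod (((rotor.idxOf (String.ofList [pvAlph.getD (PySem.Int.mod (idx + p) 26).toNat 'A']) : Int)) - p + 26) 26) idx0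
  let idx2 := pvAidx (reflector.getD idx1.toNat "").toList
  let idx3 := [2, 1, 0].foldl (fun idx i =>
      let rotor := rotors.getD i []
      let p := pos.getD i 0
      PySem.Int.mod (pvAidx (rotor.getD (PySem.Int.mod (idx + p) 26).toNat "").toList - p + 26) 26) idx2
  pvAlph.getD idx3.toNat 'A'

def encode_line (line : String) (rotor_pos : List Int) (rotors : List (List String)) (reflector : List String) : String :=
  String.ofList (((PySem.Str.upper line).toList.foldl (fun (st : List Char × List Int) c =>
    if PySem.Chars.isIn [c] pvAlph then
      let pos' := pvRotate st.2
      (st.1 ++ [pvEncodeChar c rotors pos' reflector], pos')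
    else (st.1 ++ [c], st.2)) ([], rotor_pos)).1)

-- ===== PORT B =====
def pvFwdT (rotors : List (List String)) : List (List Int) :=
  (List.range 3).map (fun i => (List.range 26).map (fun a =>
    ((rotors.getD i []).idxOf (String.ofList [pvAlph.getD a 'A']) : Int)))

def pvBackT (rotors : List (List String)) : List (List Int) :=
  (List.range 3).map (fun i => (List.range 26).map (fun a =>
    pvAidx ((rotors.getD i []).getD a "").toList))

def pvReflT (reflector : List String) : List Int :=
  (List.range 26).map (fun a => pvAidx (reflector.getD a "").toList)

def pvBase (rotor_pos : List Int) : Int :=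
  PySem.Int.mod (rotor_pos.getD 0 0) 26 + 26 * PySem.Int.mod (rotor_pos.getD 1 0) 26
    + 676 * PySem.Int.mod (rotor_pos.getD 2 0) 26

def pvEncodeCharB (fwd back : List (List Int)) (refl : List Int) (t : Int) (c : Char) : Char :=
  let p : List Int := [PySem.Int.mod t 26, PySem.Int.mod (PySem.Int.floordiv t 26) 26,
                       PySem.Int.mod (PySem.Int.floordiv t 676) 26]
  let idx0 : Int := pvAidx [c]
  let idx1 := (List.range 3).foldl (fun idx i =>
      PySem.Int.mod ((fwd.getD i []).getD (PySem.Int.mod (idx + p.getD i 0) 26).toNat 0 - p.getD i 0) 26) idx0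
  let idx2 := refl.getD idx1.toNat 0
  let idx3 := [2, 1, 0].foldl (fun idx i =>
      PySem.Int.mod ((back.getD i []).getD (PySem.Int.mod (idx + p.getD i 0) 26).toNat 0 - p.getD i 0) 26) idx2
  pvAlph.getD idx3.toNat 'A'

def encode_line_alt (line : String) (rotor_pos : List Int) (rotors : List (List String)) (reflector : List String) : String :=
  let up := (PySem.Str.upper line).toList
  if up.all (fun c => !PySem.Chars.isIn [c] pvAlph) then String.ofList up
  else
    let fwd := pvFwdT rotors
    let back := pvBackT rotors
    let refl := pvReflT reflector
    let base := pvBase rotor_pos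
    String.ofList ((up.foldl (fun (st : List Char × Int) c =>
      if PySem.Chars.isIn [c] pvAlph then
        (st.1 ++ [pvEncodeCharB fwd back refl (base + st.2 + 1) c], st.2 + 1)
      else (st.1 ++ [c], st.2)) ([], (0 : Int))).1)

-- ===== PRECONDITION & SPEC =====
def pvLetters : List String := pvAlph.map (fun a => String.ofList [a])

-- Pre_ admits any input whose line encodes no letter at all (the machine is
-- never consulted), and otherwise requires the natural Enigma configuration:
-- at least three rotor positions, at least three rotors each being a 26-entry
-- permutation of the single letters, and a 26-entry reflector of single
-- letters. It excludes (a) inputs where the Python A raises (IndexError or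
-- ValueError on short or letter-less rotors once a letter is encoded) and
-- (b) a few degenerate shapes on which A still returns, such as rotors or
-- reflectors longer than 26 entries — see the cites in claim.json.
def Pre_encode_line (line : String) (rotor_pos : List Int) (rotors : List (List String)) (reflector : List String) : Prop :=
  ((PySem.Chars.upper line.toList).all (fun c => !PySem.Chars.isIn [c] pvAlph)) = true ∨
  (3 ≤ rotor_pos.length ∧ 3 ≤ rotors.length ∧
   (∀ r ∈ rotors.take 3, r.length = 26 ∧ (∀ s ∈ pvLetters, s ∈ r) ∧ (∀ s ∈ r, s ∈ pvLetters)) ∧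
   reflector.length = 26 ∧ (∀ s ∈ reflector, s ∈ pvLetters))
instance (line : String) (rotor_pos : List Int) (rotors : List (List String)) (reflector : List String) : Decidable (Pre_encode_line line rotor_pos rotors reflector) := by unfold Pre_encode_line; infer_instance

def pvWitness_encode_line : String × List Int × List (List String) × List String :=
  ("Ab c!", [1, 25, 3],
   [(List.range 26).map (fun a => String.ofList [pvAlph.getD a 'A']),
    (List.range 26).map (fun a => String.ofList [pvAlph.getD ((a + 3) % 26) 'A']),
    (List.range 26).map (fun a => String.ofList [pvAlph.getD ((a + 7) % 26) 'A'])],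
   (List.range 26).map (fun a => String.ofList [pvAlph.getD (25 - a) 'A']))

def Spec_encode_line (line : String) (rotor_pos : List Int) (rotors : List (List String)) (reflector : List String) (out : String) : Prop := out = encode_line_alt line rotor_pos rotors reflector
instance (line : String) (rotor_pos : List Int) (rotors : List (List String)) (reflector : List String) (out : String) : Decidable (Spec_encode_line line rotor_pos rotors reflector out) := by unfold Spec_encode_line; infer_instance

-- ===== CLAIM (what is proved, stated in full; the proofs are below) =====
def Claim_equal_encode_line : Prop := ∀ (line : String) (rotor_pos : List Int) (rotors : List (List String)) (reflector : List String), Dom_encode_line line rotor_pos rotors reflector → Pre_encode_line line rotor_pos rotors reflector → Spec_encode_line line rotor_pos rotors reflector (encode_line line rotor_pos rotors reflector)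

-- ===== LEMMAS AND PROOFS =====

-- the odometer invariant: the first three cells of pos agree mod 26 with the base-26 digits of t
def pvInv (pos : List Int) (t : Int) : Prop :=
  3 ≤ pos.length ∧
  (pos.getD 0 0) % 26 = t % 26 ∧
  (pos.getD 1 0) % 26 = (t / 26) % 26 ∧
  (pos.getD 2 0) % 26 = (t / 676) % 26

theorem pvMod_eq (a : Int) : PySem.Int.mod a 26 = a % 26 :=
  PySem.Int.mod_eq_emod_of_pos (by omega)

theorem pvFdiv_eq (a : Int) (b : Int) (hb : 0 < b) : PySem.Int.floordiv a b = a / b :=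
  PySem.Int.floordiv_eq_ediv_of_pos hb

theorem pvInv_init (rotor_pos : List Int) (h : 3 ≤ rotor_pos.length) :
    pvInv rotor_pos (pvBase rotor_pos) := by
  unfold pvInv pvBase
  refine ⟨h, ?_, ?_, ?_⟩ <;> simp only [pvMod_eq] <;> omega

theorem pvInv_rotate (pos : List Int) (t : Int) (_ht : 0 ≤ t) (h : pvInv pos t) :
    pvInv (pvRotate pos) (t + 1) := by
  obtain ⟨hlen, h0, h1, h2⟩ := h
  rcases pos with _ | ⟨a, _ | ⟨b, _ | ⟨c, rest⟩⟩⟩ <;> simp at hlen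
  simp only [List.getD_cons_zero, List.getD_cons_succ] at h0 h1 h2
  simp only [pvRotate, pvMod_eq, List.set, List.getD_cons_zero, List.getD_cons_succ]
  split_ifs with hc1 hc2 <;>
    simp only [pvInv, List.length_cons, List.getD_cons_zero, List.getD_cons_succ] <;>
    refine ⟨by omega, ?_, ?_, ?_⟩ <;> omega

theorem pvModAdd (x p q : Int) (h : p % 26 = q % 26) :
    PySem.Int.mod (x + p) 26 = PySem.Int.mod (x + q) 26 := by
  simp only [pvMod_eq]; omega

theorem pvModSub (x p q : Int) (h : p % 26 = q % 26) :
    PySem.Int.mod (x - p + 26) 26 = PySem.Int.mod (x - q) 26 := by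
  simp only [pvMod_eq]; omega

theorem pvFwd_look (rotors : List (List String)) (i x : Nat) (hi : i < 3) (hx : x < 26) :
    ((pvFwdT rotors).getD i []).getD x 0
      = ((rotors.getD i []).idxOf (String.ofList [pvAlph.getD x 'A']) : Int) := by
  unfold pvFwdT
  simp [List.getD_eq_getElem?_getD, hi, hx]

theorem pvBack_look (rotors : List (List String)) (i x : Nat) (hi : i < 3) (hx : x < 26) :
    ((pvBackT rotors).getD i []).getD x 0
      = pvAidx ((rotors.getD i []).getD x "").toList := by
  unfold pvBackT
  simp [List.getD_eq_getElem?_getD, hi, hx]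

theorem pvRefl_look (reflector : List String) (x : Nat) (hx : x < 26) :
    (pvReflT reflector).getD x 0 = pvAidx (reflector.getD x "").toList := by
  unfold pvReflT
  simp [List.getD_eq_getElem?_getD, hx]

theorem pvModBound (x : Int) : (PySem.Int.mod x 26).toNat < 26 := by
  simp only [pvMod_eq]; omega

theorem pvStageF (rotors : List (List String)) (i : Nat) (hi : i < 3) (idx p q : Int)
    (hpq : p % 26 = q % 26) :
    PySem.Int.mod (((rotors.getD i []).idxOf (String.ofList [pvAlph.getD (PySem.Int.mod (idx + p) 26).toNat 'A']) : Int) - p + 26) 26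
      = PySem.Int.mod (((pvFwdT rotors).getD i []).getD (PySem.Int.mod (idx + q) 26).toNat 0 - q) 26 := by
  rw [pvFwd_look rotors i _ hi (pvModBound (idx + q))]
  rw [pvModAdd idx p q hpq]
  exact pvModSub _ p q hpq

theorem pvStageB (rotors : List (List String)) (i : Nat) (hi : i < 3) (idx p q : Int)
    (hpq : p % 26 = q % 26) :
    PySem.Int.mod (pvAidx ((rotors.getD i []).getD (PySem.Int.mod (idx + p) 26).toNat "").toList - p + 26) 26
      = PySem.Int.mod (((pvBackT rotors).getD i []).getD (PySem.Int.mod (idx + q) 26).toNat 0 - q) 26 := by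
  rw [pvBack_look rotors i _ hi (pvModBound (idx + q))]
  rw [pvModAdd idx p q hpq]
  exact pvModSub _ p q hpq

theorem pvRefl_look2 (reflector : List String) (e : Int) :
    (pvReflT reflector).getD (PySem.Int.mod e 26).toNat 0
      = pvAidx (reflector.getD (PySem.Int.mod e 26).toNat "").toList :=
  pvRefl_look reflector _ (pvModBound e)

theorem pvChar_eq (c : Char) (rotors : List (List String)) (reflector : List String)
    (pos : List Int) (t : Int) (h : pvInv pos t) :
    pvEncodeChar c rotors pos reflector
      = pvEncodeCharB (pvFwdT rotors) (pvBackT rotors) (pvReflT reflector) t c := by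
  obtain ⟨hlen, h0, h1, h2⟩ := h
  have hd0 : pos.getD 0 0 % 26 = (PySem.Int.mod t 26) % 26 := by
    simp only [pvMod_eq]; omega
  have hd1 : pos.getD 1 0 % 26 = (PySem.Int.mod (PySem.Int.floordiv t 26) 26) % 26 := by
    rw [pvFdiv_eq t 26 (by norm_num)]; simp only [pvMod_eq]; omega
  have hd2 : pos.getD 2 0 % 26 = (PySem.Int.mod (PySem.Int.floordiv t 676) 26) % 26 := by
    rw [pvFdiv_eq t 676 (by norm_num)]; simp only [pvMod_eq]; omega
  unfold pvEncodeChar pvEncodeCharB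
  simp only [show List.range 3 = [0, 1, 2] from rfl, List.foldl_cons, List.foldl_nil,
    List.getD_cons_zero, List.getD_cons_succ]
  rw [pvStageF rotors 0 (by norm_num) _ _ _ hd0,
      pvStageF rotors 1 (by norm_num) _ _ _ hd1,
      pvStageF rotors 2 (by norm_num) _ _ _ hd2,
      pvRefl_look2,
      pvStageB rotors 2 (by norm_num) _ _ _ hd2,
      pvStageB rotors 1 (by norm_num) _ _ _ hd1,
      pvStageB rotors 0 (by norm_num) _ _ _ hd0]

theorem pvLoop (rotors : List (List String)) (reflector : List String) (cs : List Char) :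
    ∀ (acc : List Char) (pos : List Int) (base k : Int), 0 ≤ base → 0 ≤ k →
    pvInv pos (base + k) →
    (cs.foldl (fun (st : List Char × List Int) c =>
      if PySem.Chars.isIn [c] pvAlph then
        let pos' := pvRotate st.2
        (st.1 ++ [pvEncodeChar c rotors pos' reflector], pos')
      else (st.1 ++ [c], st.2)) (acc, pos)).1
    = (cs.foldl (fun (st : List Char × Int) c =>
      if PySem.Chars.isIn [c] pvAlph then
        (st.1 ++ [pvEncodeCharB (pvFwdT rotors) (pvBackT rotors) (pvReflT reflector) (base + st.2 + 1) c], st.2 + 1)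
      else (st.1 ++ [c], st.2)) (acc, k)).1 := by
  induction cs with
  | nil => intro acc pos base k _ _ _; rfl
  | cons c cs ih =>
    intro acc pos base k hbase hk hinv
    simp only [List.foldl_cons]
    by_cases hc : PySem.Chars.isIn [c] pvAlph = true
    · simp only [hc, if_true]
      have hinv' : pvInv (pvRotate pos) (base + k + 1) :=
        pvInv_rotate pos (base + k) (by omega) hinv
      rw [pvChar_eq c rotors reflector (pvRotate pos) (base + k + 1) hinv']
      have hinv'' : pvInv (pvRotate pos) (base + (k + 1)) := by
        rw [show base + (k + 1) = base + k + 1 by ring]; exact hinv'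
      exact ih _ _ base (k + 1) hbase (by omega) hinv''
    · simp only [hc, Bool.false_eq_true, if_false]
      exact ih _ _ base k hbase hk hinv

-- a line without letters passes through A's loop unchanged
theorem pvNoAlpha (rotors : List (List String)) (reflector : List String) (cs : List Char) :
    ∀ (acc : List Char) (pos : List Int),
    (∀ c ∈ cs, PySem.Chars.isIn [c] pvAlph = false) →
    (cs.foldl (fun (st : List Char × List Int) c =>
      if PySem.Chars.isIn [c] pvAlph then
        let pos' := pvRotate st.2
        (st.1 ++ [pvEncodeChar c rotors pos' reflector], pos')
      else (st.1 ++ [c], st.2)) (acc, pos)).1 = acc ++ cs := by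
  induction cs with
  | nil => intro acc pos _; simp
  | cons c cs ih =>
    intro acc pos h
    simp only [List.foldl_cons, h c (by simp), Bool.false_eq_true, if_false]
    rw [ih (acc ++ [c]) pos (fun d hd => h d (by simp [hd]))]
    simp

theorem encode_line_spec : Claim_equal_encode_line := by
  intro line rotor_pos rotors reflector _ hpre
  unfold Spec_encode_line encode_line encode_line_alt
  simp only [PySem.Str.toList_upper]
  by_cases hall : ((PySem.Chars.upper line.toList).all (fun c => !PySem.Chars.isIn [c] pvAlph)) = true
  · rw [if_pos hall]
    congr 1
    have h : ∀ c ∈ PySem.Chars.upper line.toList, PySem.Chars.isIn [c] pvAlph = false := by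
      intro c hc
      have := List.all_eq_true.mp hall c hc
      simpa using this
    simpa using pvNoAlpha rotors reflector (PySem.Chars.upper line.toList) [] rotor_pos h
  · rw [if_neg hall]
    have hcfg := hpre.resolve_left hall
    obtain ⟨hlen, -⟩ := hcfg
    have hbase : 0 ≤ pvBase rotor_pos := by unfold pvBase; simp only [pvMod_eq]; omega
    have hinv : pvInv rotor_pos (pvBase rotor_pos + 0) := by
      rw [add_zero]; exact pvInv_init rotor_pos hlen
    congr 1
    exact pvLoop rotors reflector _ [] rotor_pos (pvBase rotor_pos) 0 hbase le_rfl hinv
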